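-- pv_equiv track=rewrite | github.com/rashikumar01/Low-Resourse-Language-Translation-Sanskrit-Hindi-Machine-Translation | zst filtering/training.py | find_shifts
-- ===== SOURCE A (Python) =====
-- from itertools import product
--
-- def find_shifts(hyp, ref):
--     """Find possible shifts in hypothesis."""
--     hyp_len, ref_len = len(hyp), len(ref)
--     for i, j in product(range(hyp_len), range(ref_len)):
--         if i == j: # Skip words in the same position.
--             continue
--         # When word matches.
--         if hyp[i] == ref[j]:
--             # Find the longest matching phrase from this position
--             l = 0
--             for l, (h, r) in enumerate(zip(hyp[i:], ref[j:])):
--                 if h != r: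
--                     break
--                 l += 1
--             # Compute the shifted hypothesis.
--             shifted_hyp = hyp[:i] + hyp[i+l:]
--             shifted_hyp[j:j] = hyp[i:i+l]
--             yield shifted_hyp
-- ===== SOURCE B (Python) =====
-- def find_shifts(hyp, ref):
--     """Find possible shifts in hypothesis (suffix DP table instead of rescanning matches)."""
--     n, m = len(hyp), len(ref)
--     # L[i][j] = length of the longest common run of hyp[i:] and ref[j:],
--     # filled back to front by the recurrence L[i][j] = 1 + L[i+1][j+1] on a match.
--     L = [[0] * (m + 1) for _ in range(n + 1)]
--     for i in range(n - 1, -1, -1):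
--         for j in range(m - 1, -1, -1):
--             if hyp[i] == ref[j]:
--                 L[i][j] = L[i + 1][j + 1] + 1
--     for i in range(n):
--         for j in range(m):
--             l = L[i][j]
--             if l and i != j:
--                 rest = hyp[:i] + hyp[i + l:]
--                 yield rest[:j] + hyp[i:i + l] + rest[j:]
-- ===== Notes on version B (the rewrite author's own statement) =====
-- stated objective: alternative
-- what changed: Replaces A's per-pair rescan of the matching run (enumerate(zip(hyp[i:], ref[j:])) inside the product loop) by a suffix dynamic-programming table L[i][j] = 1 + L[i+1][j+1] filled back to front in one pass, from which each match length is read off in O(1).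
import Mathlib
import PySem

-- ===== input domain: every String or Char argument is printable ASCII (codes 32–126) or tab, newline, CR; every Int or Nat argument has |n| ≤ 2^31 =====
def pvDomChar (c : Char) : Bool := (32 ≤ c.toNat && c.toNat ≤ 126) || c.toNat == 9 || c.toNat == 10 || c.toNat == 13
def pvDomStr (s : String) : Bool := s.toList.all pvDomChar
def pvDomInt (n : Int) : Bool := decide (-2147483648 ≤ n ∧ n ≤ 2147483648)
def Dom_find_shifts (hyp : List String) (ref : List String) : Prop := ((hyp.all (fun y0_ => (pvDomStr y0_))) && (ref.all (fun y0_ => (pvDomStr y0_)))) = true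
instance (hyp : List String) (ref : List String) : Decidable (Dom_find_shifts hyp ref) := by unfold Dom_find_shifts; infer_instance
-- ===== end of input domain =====

-- B replaces A's per-pair rescan of the matching run by a suffix DP table filled back to front; same yields in the same order.

-- ===== PORT A =====
-- A's 'for l, (h, r) in enumerate(zip(...)): if h != r: break; l += 1' loop; idx is the enumerate index (= current l)
def pvMatchLen : Nat → List (String × String) → Nat
  | idx, [] => idx
  | idx, (h, r) :: rest => if h ≠ r then idx else pvMatchLen (idx + 1) rest

def find_shifts (hyp : List String) (ref : List String) : List (List String) :=
  (List.range hyp.length).flatMap (fun i =>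
    (List.range ref.length).flatMap (fun j =>
      if i = j then []
      else if hyp.getD i "" = ref.getD j "" then
        let l := pvMatchLen 0 (List.zip (hyp.drop i) (ref.drop j))
        let shifted := hyp.take i ++ hyp.drop (i + l)
        [shifted.take j ++ (hyp.drop i).take l ++ shifted.drop j]
      else []))

-- ===== PORT B =====
-- row i of B's DP table, computed from row i+1 ('next'); the all-zero boundary
-- row/column of the Python table is represented here by getD's default 0
def pvRow (h : String) (ref : List String) (next : List Nat) : List Nat :=
  (List.range ref.length).map (fun j => if h = ref.getD j "" then next.getD (j + 1) 0 + 1 else 0)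

-- the table built back to front (Python's descending i loop)
def pvTable (ref : List String) : List String → List (List Nat)
  | [] => []
  | h :: hs => pvRow h ref ((pvTable ref hs).headD []) :: pvTable ref hs

def find_shifts_alt (hyp : List String) (ref : List String) : List (List String) :=
  let L := pvTable ref hyp
  (List.range hyp.length).flatMap (fun i =>
    (List.range ref.length).flatMap (fun j =>
      let l := (L.getD i []).getD j 0
      if l ≠ 0 ∧ i ≠ j then
        let rest := hyp.take i ++ hyp.drop (i + l)
        [rest.take j ++ (hyp.drop i).take l ++ rest.drop j]
      else []))

-- ===== PRECONDITION & SPEC =====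
def Spec_find_shifts (hyp : List String) (ref : List String) (out : List (List String)) : Prop := out = find_shifts_alt hyp ref
instance (hyp : List String) (ref : List String) (out : List (List String)) : Decidable (Spec_find_shifts hyp ref out) := by unfold Spec_find_shifts; infer_instance

-- ===== CLAIM (what is proved, stated in full; the proofs are below) =====
def Claim_equal_find_shifts : Prop := ∀ (hyp : List String) (ref : List String), Dom_find_shifts hyp ref → Spec_find_shifts hyp ref (find_shifts hyp ref)

-- ===== LEMMAS AND PROOFS =====

-- proof-side characterisation: length of the common prefix of two lists
def pvLcp : List String → List String → Nat
  | h :: hs, r :: rs => if h = r then pvLcp hs rs + 1 else 0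
  | _, _ => 0

-- A's enumerate(zip)-with-break loop computes idx + (common-prefix length)
lemma matchLen_eq (hs rs : List String) (idx : Nat) :
    pvMatchLen idx (List.zip hs rs) = idx + pvLcp hs rs := by
  induction hs generalizing rs idx with
  | nil => cases rs <;> simp [pvMatchLen, pvLcp]
  | cons h hs ih =>
    cases rs with
    | nil => simp [pvMatchLen, pvLcp]
    | cons r rs =>
      by_cases hr : h = r
      · simp [pvMatchLen, pvLcp, hr, ih]; omega
      · simp [pvMatchLen, pvLcp, hr]

-- the DP table entry (i, j) is the common-prefix length of the suffixes at i and j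
lemma table_get (ref hyp : List String) (i j : Nat) :
    (((pvTable ref hyp).getD i []).getD j 0) = pvLcp (hyp.drop i) (ref.drop j) := by
  induction hyp generalizing i j with
  | nil => cases (ref.drop j) <;> simp [pvTable, pvLcp]
  | cons h hs ih =>
    cases i with
    | succ i' => simpa [pvTable] using ih i' j
    | zero =>
      have hhead : (pvTable ref hs).headD [] = (pvTable ref hs).getD 0 [] := by
        cases (pvTable ref hs) <;> rfl
      simp only [pvTable, List.getD_cons_zero, List.drop_zero]
      by_cases hj : j < ref.length
      · have hdrop : ref.drop j = ref.getD j "" :: ref.drop (j + 1) := by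
          rw [List.drop_eq_getElem_cons hj, List.getD_eq_getElem ref "" hj]
        have hv : (pvRow h ref ((pvTable ref hs).headD [])).getD j 0
            = if h = ref.getD j "" then ((pvTable ref hs).headD []).getD (j + 1) 0 + 1 else 0 := by
          unfold pvRow
          rw [List.getD_eq_getElem _ 0 (by simpa using hj)]
          simp [hj]
        rw [hv, hhead, ih 0, hdrop]
        simp [pvLcp]
      · have hdrop : ref.drop j = [] := List.drop_eq_nil_of_le (by omega)
        rw [List.getD_eq_default _ _ (by simp [pvRow]; omega), hdrop]
        simp [pvLcp]

-- ===== VERDICT (by name: the statement is the Claim_ definition above) =====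
theorem find_shifts_spec : Claim_equal_find_shifts := by
  intro hyp ref _
  unfold Spec_find_shifts find_shifts find_shifts_alt
  simp only [table_get, matchLen_eq, Nat.zero_add]
  apply List.flatMap_congr
  intro i hi
  apply List.flatMap_congr
  intro j hj
  rw [List.mem_range] at hi hj
  have hdropH : hyp.drop i = hyp.getD i "" :: hyp.drop (i + 1) := by
    rw [List.drop_eq_getElem_cons hi, List.getD_eq_getElem hyp "" hi]
  have hdropR : ref.drop j = ref.getD j "" :: ref.drop (j + 1) := by
    rw [List.drop_eq_getElem_cons hj, List.getD_eq_getElem ref "" hj]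
  by_cases hij : i = j
  · simp [hij]
  · by_cases hm : hyp.getD i "" = ref.getD j ""
    · have hlcp : pvLcp (hyp.drop i) (ref.drop j) ≠ 0 := by
        rw [hdropH, hdropR, pvLcp, if_pos hm]; simp
      rw [if_neg hij, if_pos hm, if_pos (And.intro hlcp hij)]
    · have hlcp : pvLcp (hyp.drop i) (ref.drop j) = 0 := by
        rw [hdropH, hdropR, pvLcp, if_neg hm]
      rw [if_neg hij, if_neg hm, hlcp]
      simp
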